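-- pv_equiv track=rewrite | github.com/gmittal/jazzml | preprocess.py | lst_set
-- ===== SOURCE A (Python) =====
-- def lst_set(lst):
--     last = object()
--     lst = sorted(lst, reverse=True)
--     for item in lst:
--         if item == last:
--             continue
--         yield item
--         last = item
-- ===== SOURCE B (Python) =====
-- def lst_set(lst):
--     yield from sorted(set(lst), reverse=True)
-- ===== Notes on version B (the rewrite author's own statement) =====
-- stated objective: idiomatic
-- what changed: B deduplicates with a hash set up front and yields sorted(set(lst), reverse=True), instead of sorting first and skipping adjacent duplicates with a running `last` sentinel.
import Mathlib
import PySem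

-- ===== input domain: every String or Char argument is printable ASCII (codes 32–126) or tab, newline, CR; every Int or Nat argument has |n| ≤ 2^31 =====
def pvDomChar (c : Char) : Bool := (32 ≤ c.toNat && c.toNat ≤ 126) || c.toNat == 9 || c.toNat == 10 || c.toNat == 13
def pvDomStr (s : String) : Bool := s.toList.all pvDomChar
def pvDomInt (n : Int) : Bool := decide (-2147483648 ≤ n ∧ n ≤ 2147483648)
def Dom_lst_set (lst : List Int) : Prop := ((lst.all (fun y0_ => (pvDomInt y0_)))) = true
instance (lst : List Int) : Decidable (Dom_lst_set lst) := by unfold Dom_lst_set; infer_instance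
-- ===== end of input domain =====

-- B dedups with a hash set before sorting instead of skipping adjacent equals with a `last` sentinel; return value (yielded sequence) is proved equal.

-- ===== PORT A =====
-- the generator loop: `last` starts as a fresh object (equal to no int) -> Option Int, none;
-- `yield item` -> cons; `continue` -> recurse with the same `last`.
def lst_setLoop (last : Option Int) : List Int → List Int
  | [] => []
  | item :: rest =>
    if some item = last then lst_setLoop last rest
    else item :: lst_setLoop (some item) rest

def lst_set (lst : List Int) : List Int :=
  lst_setLoop none (PySem.List.sorted lst (fun x => x) true)

-- ===== PORT B =====
-- sorted(set(lst), reverse=True)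
def lst_set_alt (lst : List Int) : List Int :=
  PySem.List.sorted (PySem.Set.ofList lst) (fun x => x) true

-- ===== PRECONDITION & SPEC =====
def Spec_lst_set (lst : List Int) (out : List Int) : Prop := out = lst_set_alt lst
instance (lst : List Int) (out : List Int) : Decidable (Spec_lst_set lst out) := by unfold Spec_lst_set; infer_instance

-- ===== CLAIM (what is proved, stated in full; the proofs are below) =====
def Claim_equal_lst_set : Prop := ∀ (lst : List Int), Dom_lst_set lst → Spec_lst_set lst (lst_set lst)

-- ===== LEMMAS AND PROOFS =====

-- membership in A's loop output: exactly the elements of a (descending-)sorted input that differ from `last`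
theorem mem_lst_setLoop (l : List Int) (last : Option Int)
    (hs : l.Pairwise (fun a b => b ≤ a))
    (hb : ∀ m, last = some m → ∀ x ∈ l, x ≤ m) :
    ∀ x, x ∈ lst_setLoop last l ↔ x ∈ l ∧ some x ≠ last := by
  induction l generalizing last with
  | nil => simp [lst_setLoop]
  | cons item rest ih =>
    have hrest := (List.pairwise_cons.mp hs).2
    have hhead := (List.pairwise_cons.mp hs).1
    intro x
    by_cases h : some item = last
    · simp only [lst_setLoop, if_pos h]
      rw [ih last hrest (by intro m hm y hy; exact hb m hm y (List.mem_cons_of_mem _ hy)) x]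
      constructor
      · rintro ⟨hx, hne⟩; exact ⟨List.mem_cons_of_mem _ hx, hne⟩
      · rintro ⟨hx, hne⟩
        rcases List.mem_cons.mp hx with rfl | hx
        · exact absurd h hne
        · exact ⟨hx, hne⟩
    · simp only [lst_setLoop, if_neg h, List.mem_cons]
      rw [ih (some item) hrest (by rintro m ⟨rfl⟩ y hy; exact hhead y hy) x]
      constructor
      · rintro (rfl | ⟨hx, hne⟩)
        · exact ⟨Or.inl rfl, h⟩
        · refine ⟨Or.inr hx, ?_⟩
          intro hlx
          have h1 : item ≤ x := hb x hlx.symm item (List.mem_cons_self ..)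
          have h2 : x ≤ item := hhead x hx
          exact hne (congrArg some (by omega : x = item))
      · rintro ⟨rfl | hx, hne⟩
        · exact Or.inl rfl
        · by_cases hxi : x = item
          · exact Or.inl hxi
          · exact Or.inr ⟨hx, by simpa using hxi⟩

-- A's loop output on a descending input is strictly decreasing
theorem pairwise_lst_setLoop (l : List Int) (last : Option Int)
    (hs : l.Pairwise (fun a b => b ≤ a)) :
    (lst_setLoop last l).Pairwise (fun a b => b < a) := by
  induction l generalizing last with
  | nil => simp [lst_setLoop]
  | cons item rest ih =>
    have hrest := (List.pairwise_cons.mp hs).2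
    have hhead := (List.pairwise_cons.mp hs).1
    by_cases h : some item = last
    · simpa [lst_setLoop, if_pos h] using ih last hrest
    · simp only [lst_setLoop, if_neg h]
      refine List.pairwise_cons.mpr ⟨?_, ih (some item) hrest⟩
      intro y hy
      have := (mem_lst_setLoop rest (some item) hrest
        (by rintro m ⟨rfl⟩ x hx; exact hhead x hx) y).mp hy
      have hle := hhead y this.1
      have hne : y ≠ item := by simpa using this.2
      omega

-- ===== VERDICT (by name: the statement is the Claim_ definition above) =====
theorem lst_set_spec : Claim_equal_lst_set := by
  intro lst _
  unfold Spec_lst_set lst_set lst_set_alt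
  set s := PySem.List.sorted lst (fun x => x) true with hsdef
  have hs : s.Pairwise (fun a b => b ≤ a) := PySem.List.sorted_pairwise_rev lst (fun x => x)
  have hmem := mem_lst_setLoop s none hs (by rintro m ⟨⟩)
  have hpw := pairwise_lst_setLoop s none hs
  have hnodup : (lst_setLoop none s).Nodup := (hpw.imp (fun h => by omega)).nodup
  have hperm : (lst_setLoop none s).Perm (PySem.Set.ofList lst) := by
    rw [List.perm_ext_iff_of_nodup hnodup (PySem.Set.nodup_ofList lst)]
    intro a
    rw [hmem a, PySem.Set.mem_ofList]
    simp [hsdef, PySem.List.mem_sorted]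
  exact (PySem.List.sorted_rev_eq_of_perm_of_pairwise_gt _ _ _ hperm hpw).symm
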